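-- pv_equiv track=rewrite | github.com/bayhiker/python-algorithms | leetcode/lc_2000/lc_2028.py | missing_rolls_dfs
-- ===== SOURCE A (Python) =====
-- def missing_rolls_dfs(rolls: list[int], mean: int, n: int) -> list[int]:
--     # Accepted, but slow
--     n_sum = mean * (n + len(rolls)) - sum(rolls)
--
--     # Find n numbers between 1-6 adding up to n_sum
--     # DFS with trimming
--     stack: list[int] = []  # stores current roll assignments
--
--     def dfs(curr_sum: int):
--         count = n - len(stack)
--         if count * 6 < n_sum - curr_sum or count > n_sum - curr_sum:
--             if stack:
--                 stack.pop()
--             return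
--         if count == 1:
--             stack.append(n_sum - curr_sum)
--             return
--         for i in range(1, 7):
--             stack.append(i)
--             dfs(curr_sum + i)
--             if len(stack) == n:
--                 return
--
--     dfs(0)
--     return stack if stack else []
-- ===== SOURCE B (Python) =====
-- def missing_rolls_dfs(rolls: list[int], mean: int, n: int) -> list[int]:
--     n_sum = mean * (n + len(rolls)) - sum(rolls)
--     if n <= 0 or n_sum < n or n_sum > 6 * n:
--         return []
--     res = []
--     rem = n_sum
--     for k in range(n, 0, -1):
--         v = max(1, rem - 6 * (k - 1))
--         res.append(v)
--         rem -= v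
--     return res
-- ===== Notes on version B (the rewrite author's own statement) =====
-- stated objective: simpler
-- what changed: A's recursive backtracking DFS (trying die values 1..6 at each depth with pruning and a mutable stack) is replaced by a single flat loop that computes the smallest feasible die value for each position in closed form (max(1, rem - 6*(k-1))) after an upfront feasibility check; Pre_ excludes feasible inputs with n > 900, where A's depth-n recursion hits Python's recursion limit.
import Mathlib
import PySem

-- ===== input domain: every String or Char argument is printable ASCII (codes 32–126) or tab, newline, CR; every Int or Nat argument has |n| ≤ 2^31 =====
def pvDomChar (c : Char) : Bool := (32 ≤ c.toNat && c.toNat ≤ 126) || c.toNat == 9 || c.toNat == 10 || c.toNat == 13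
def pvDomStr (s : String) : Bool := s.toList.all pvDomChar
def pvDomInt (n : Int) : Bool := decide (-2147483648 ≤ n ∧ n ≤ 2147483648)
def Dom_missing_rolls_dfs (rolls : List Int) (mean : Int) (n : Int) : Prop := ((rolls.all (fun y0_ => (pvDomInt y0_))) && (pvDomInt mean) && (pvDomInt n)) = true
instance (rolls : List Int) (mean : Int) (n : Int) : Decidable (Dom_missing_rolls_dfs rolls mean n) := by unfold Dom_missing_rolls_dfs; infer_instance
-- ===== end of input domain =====

-- B replaces A's recursive backtracking DFS (which tries die values 1..6 at each depth)
-- by a single flat loop that places the smallest feasible die value in closed form;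
-- objective: simpler (and it removes the recursion).

-- ===== PORT A =====
-- A's inner 'for i in range(1, 7)' loop with the early return 'if len(stack) == n: return';
-- j counts the remaining iterations (j = 7 - i), the stack is threaded through the calls
-- exactly as Python mutates it (append at the end, pop = dropLast inside dfs).
def goA (dfs : List Int → Int → List Int) (n : Int) : Nat → Int → List Int → Int → List Int
  | 0, _, stack, _ => stack
  | j + 1, i, stack, curr =>
      let s' := dfs (stack ++ [i]) (curr + i)
      if (s'.length : Int) = n then s' else goA dfs n j (i + 1) s' curr

-- A's nested 'def dfs(curr_sum)'; the Python recursion is not structurally decreasing in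
-- Lean, so it carries a fuel parameter: with fuel ≥ n.toNat + 2 (what the top-level call
-- supplies) the fuel never runs out, so the guard only makes the same computation total.
def dfsA (n nsum : Int) : Nat → List Int → Int → List Int
  | 0, stack, _ => stack
  | fuel + 1, stack, curr =>
      let count : Int := n - stack.length
      if count * 6 < nsum - curr ∨ count > nsum - curr then
        stack.dropLast
      else if count = 1 then
        stack ++ [nsum - curr]
      else
        goA (dfsA n nsum fuel) n 6 1 stack curr

def missing_rolls_dfs (rolls : List Int) (mean : Int) (n : Int) : List Int :=
  let nsum := mean * (n + rolls.length) - rolls.sum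
  let stack := dfsA n nsum (n.toNat + 2) [] 0
  if stack.isEmpty then [] else stack

-- ===== PORT B =====
-- Source B's 'for k in range(n, 0, -1)' loop: k remaining positions, rem the remaining sum.
def bloop : Nat → Int → List Int
  | 0, _ => []
  | k + 1, rem =>
      let v := max 1 (rem - 6 * (k : Int))
      v :: bloop k (rem - v)

def missing_rolls_dfs_alt (rolls : List Int) (mean : Int) (n : Int) : List Int :=
  let n_sum := mean * (n + rolls.length) - rolls.sum
  if n ≤ 0 ∨ n_sum < n ∨ n_sum > 6 * n then []
  else bloop n.toNat n_sum

-- ===== PRECONDITION & SPEC =====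
-- Pre_ excludes feasible inputs with n > 900 (those on which A recurses to depth n): for
-- n near or beyond Python's default recursion limit A raises RecursionError, and the exact
-- raise point depends on the interpreter stack, so a margin below the limit is kept;
-- infeasible inputs of any size stay inside Pre_ (A answers them without deep recursion).
def Pre_missing_rolls_dfs (rolls : List Int) (mean : Int) (n : Int) : Prop :=
  mean * (n + rolls.length) - rolls.sum < n ∨
  6 * n < mean * (n + rolls.length) - rolls.sum ∨
  n ≤ 900
instance (rolls : List Int) (mean : Int) (n : Int) : Decidable (Pre_missing_rolls_dfs rolls mean n) := by unfold Pre_missing_rolls_dfs; infer_instance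
def pvWitness_missing_rolls_dfs : List Int × Int × Int := ([2, 3], 3, 4)

def Spec_missing_rolls_dfs (rolls : List Int) (mean : Int) (n : Int) (out : List Int) : Prop := out = missing_rolls_dfs_alt rolls mean n
instance (rolls : List Int) (mean : Int) (n : Int) (out : List Int) : Decidable (Spec_missing_rolls_dfs rolls mean n out) := by unfold Spec_missing_rolls_dfs; infer_instance

-- ===== CLAIM (what is proved, stated in full; the proofs are below) =====
def Claim_equal_missing_rolls_dfs : Prop := ∀ (rolls : List Int) (mean : Int) (n : Int), Dom_missing_rolls_dfs rolls mean n → Pre_missing_rolls_dfs rolls mean n → Spec_missing_rolls_dfs rolls mean n (missing_rolls_dfs rolls mean n)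

-- ===== LEMMAS AND PROOFS =====

theorem bloop_length (k : Nat) : ∀ rem : Int, (bloop k rem).length = k := by
  induction k with
  | zero => intro rem; rfl
  | succ k ih => intro rem; simp [bloop, ih]

-- One-step unfolding of dfsA at positive fuel (keeps the recursive call folded).
theorem dfsA_succ (n nsum : Int) (fuel : Nat) (stack : List Int) (curr : Int) :
    dfsA n nsum (fuel + 1) stack curr =
      if (n - (stack.length : Int)) * 6 < nsum - curr ∨ (n - (stack.length : Int)) > nsum - curr
      then stack.dropLast
      else if (n - (stack.length : Int)) = 1 then stack ++ [nsum - curr]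
      else goA (dfsA n nsum fuel) n 6 1 stack curr := rfl

-- Infeasible call: A's dfs pops the caller's push and returns immediately.
theorem dfsA_fail (n nsum : Int) (fuel : Nat) (stack : List Int) (curr : Int)
    (hfuel : 1 ≤ fuel)
    (h : nsum - curr < n - stack.length ∨ nsum - curr > 6 * (n - stack.length)) :
    dfsA n nsum fuel stack curr = stack.dropLast := by
  obtain ⟨f, rfl⟩ : ∃ f, fuel = f + 1 := ⟨fuel - 1, by omega⟩
  rw [dfsA_succ, if_pos (by omega)]

-- The loop lemma: while the child is infeasible (i < v) the stack comes back unchanged and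
-- the loop continues; at i = v the child returns a full stack and the loop returns it.
theorem goA_spec (dfs : List Int → Int → List Int) (n : Int) (stack : List Int) (curr : Int)
    (v : Int) (rest : List Int)
    (hv : v ≤ 6)
    (hlen : (stack.length : Int) ≠ n)
    (h1 : ∀ i : Int, 1 ≤ i → i < v → dfs (stack ++ [i]) (curr + i) = stack)
    (h2 : dfs (stack ++ [v]) (curr + v) = stack ++ v :: rest)
    (h2len : ((stack ++ v :: rest).length : Int) = n) :
    ∀ (j : Nat) (i : Int), i + j = 7 → 1 ≤ i → i ≤ v →
      goA dfs n j i stack curr = stack ++ v :: rest := by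
  intro j
  induction j with
  | zero => intro i h7 h1i hiv; omega
  | succ j ih =>
      intro i h7 h1i hiv
      by_cases hev : i = v
      · subst hev
        simp only [goA]
        rw [h2, if_pos h2len]
      · have hlt : i < v := lt_of_le_of_ne hiv hev
        have hs : dfs (stack ++ [i]) (curr + i) = stack := h1 i h1i hlt
        simp only [goA]
        rw [hs, if_neg hlen]
        exact ih (i + 1) (by omega) (by omega) (by omega)

-- Feasible call: A's dfs extends the stack with exactly B's greedy sequence.
theorem dfsA_ok (n nsum : Int) : ∀ (fuel : Nat) (stack : List Int) (curr : Int),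
    (n - stack.length).toNat + 2 ≤ fuel + 1 →
    n - stack.length ≤ nsum - curr → nsum - curr ≤ 6 * (n - stack.length) →
    dfsA n nsum (fuel + 1) stack curr = stack ++ bloop (n - stack.length).toNat (nsum - curr) := by
  intro fuel
  induction fuel with
  | zero => intro stack curr hf; omega
  | succ fuel ih =>
      intro stack curr hf hlo hhi
      have hc0 : (0 : Int) ≤ n - stack.length := by by_contra h; omega
      rw [dfsA_succ, if_neg (by omega)]
      by_cases hc1 : (n - (stack.length : Int)) = 1
      · -- count == 1 branch: append the remaining sum
        rw [if_pos hc1]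
        have hk : (n - (stack.length : Int)).toNat = 1 := by omega
        rw [hk]
        simp only [bloop, Nat.cast_zero, mul_zero, sub_zero]
        have : max 1 (nsum - curr) = nsum - curr := by omega
        rw [this]
      · rw [if_neg hc1]
        by_cases hc00 : (n - (stack.length : Int)) = 0
        · -- count = 0 (so rem = 0): the i = 1 child is infeasible and hands the stack
          -- back, and len(stack) == n stops the loop at once.
          have hchild : dfsA n nsum (fuel + 1) (stack ++ [1]) (curr + 1) = stack := by
            have := dfsA_fail n nsum (fuel + 1) (stack ++ [(1 : Int)]) (curr + 1)
              (by omega) (by simp; omega)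
            simpa [List.dropLast_concat] using this
          simp only [goA]
          rw [hchild, if_pos (by omega)]
          have hk : (n - (stack.length : Int)).toNat = 0 := by omega
          rw [hk]
          simp [bloop]
        · -- count ≥ 2: run the loop; v is the smallest feasible die value.
          have hc2 : (2 : Int) ≤ n - stack.length := by omega
          set v : Int := max 1 ((nsum - curr) - 6 * ((n - stack.length) - 1)) with hv
          have hv1 : 1 ≤ v := le_max_left _ _
          have hv6 : v ≤ 6 := by omega
          -- child at i = v is feasible; the induction hypothesis describes it
          have hchildv : dfsA n nsum (fuel + 1) (stack ++ [v]) (curr + v)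
              = stack ++ v :: bloop ((n - stack.length) - 1).toNat ((nsum - curr) - v) := by
            have h := ih (stack ++ [v]) (curr + v)
              (by simp; omega) (by simp; omega) (by simp; omega)
            rw [h]
            have e1 : (n - ((stack ++ [v]).length : Int)).toNat = ((n - stack.length) - 1).toNat := by
              simp; omega
            have e2 : nsum - (curr + v) = (nsum - curr) - v := by ring
            rw [e1, e2]
            simp
          have hfull : ((stack ++ v :: bloop ((n - stack.length) - 1).toNat ((nsum - curr) - v)).length : Int) = n := by
            simp [bloop_length]; omega
          rw [goA_spec (dfsA n nsum (fuel + 1)) n stack curr v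
                (bloop ((n - stack.length) - 1).toNat ((nsum - curr) - v)) hv6 (by omega)
                (fun i hi1 hiv => by
                  -- child at i < v is infeasible (its sum exceeds 6 per position);
                  -- it pops i back off the stack
                  have := dfsA_fail n nsum (fuel + 1) (stack ++ [i]) (curr + i)
                    (by omega) (by simp; omega)
                  simpa [List.dropLast_concat] using this)
                hchildv hfull 6 1 (by omega) (by omega) hv1]
          -- identify the loop's result with bloop's unfolding
          obtain ⟨k, hk⟩ : ∃ k : Nat, (n - (stack.length : Int)).toNat = k + 1 :=
            ⟨(n - (stack.length : Int)).toNat - 1, by omega⟩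
          rw [hk]
          simp only [bloop]
          have e1 : max 1 ((nsum - curr) - 6 * (k : Int)) = v := by
            rw [hv]; have : (k : Int) = (n - stack.length) - 1 := by omega
            rw [this]
          have e2 : ((n - (stack.length : Int)) - 1).toNat = k := by omega
          rw [e1, e2]

-- ===== VERDICT (by name: the statement is the Claim_ definition above) =====
-- The ports themselves agree on ALL inputs; Pre_ is needed only because the real Python A
-- raises RecursionError on deep feasible inputs, so the Pre_ hypothesis is not used below.
theorem missing_rolls_dfs_spec : Claim_equal_missing_rolls_dfs := by
  intro rolls mean n _ _
  simp only [Spec_missing_rolls_dfs, missing_rolls_dfs, missing_rolls_dfs_alt]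
  set nsum : Int := mean * (n + rolls.length) - rolls.sum with hnsum
  by_cases hfeas : n ≤ nsum ∧ nsum ≤ 6 * n
  · -- feasible: the DFS fills the stack with exactly B's greedy sequence
    obtain ⟨f, hfe⟩ : ∃ f, n.toNat + 2 = f + 1 := ⟨n.toNat + 1, rfl⟩
    have h := dfsA_ok n nsum f [] 0 (by simp; omega) (by simp; omega) (by simp; omega)
    rw [← hfe] at h
    simp only [List.length_nil, Nat.cast_zero, sub_zero, List.nil_append] at h
    rw [h]
    by_cases hn0 : n ≤ 0
    · have hz : n.toNat = 0 := by omega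
      rw [hz]
      simp [bloop, hn0]
    · have hne : (bloop n.toNat nsum).isEmpty = false := by
        rcases hb : bloop n.toNat nsum with _ | ⟨a, t⟩
        · have := bloop_length n.toNat nsum
          rw [hb] at this; simp at this; omega
        · simp
      rw [hne]
      simp only [Bool.false_eq_true, if_false]
      rw [if_neg (by omega)]
  · -- infeasible: both return []
    have h := dfsA_fail n nsum (n.toNat + 2) [] 0 (by omega) (by simp; omega)
    rw [h]
    simp only [List.dropLast_nil, List.isEmpty_nil, if_true]
    rw [if_pos (by omega)]
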